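-- pv_equiv track=rewrite | github.com/ubernostrum/django-compat-lint | rules/django_15.py | check_django_15
-- ===== SOURCE A (Python) =====
-- def check_password_hasher(line, filename, options):
--     warnings = []
--     if 'PASSWORD_HASHERS' in line:
--         warnings.append('Custom password hashers are now required to accept Unicode strings.')
--     return warnings, [], []
--
-- def check_simplejson(line, filename, options):
--     warnings = []
--     if 'simplejson' in line:
--         warnings.append("Use of the standard-library 'json' module is strongly recommended instead of simplejson.")
--     return warnings, [], []
--
-- def check_transactiontestcase(line, filename, options):
--     warnings = []
--     if 'TransactionTestCase' in line:
--         warnings.append("TransactionTestCase behavior has changed; check that tests do not rely on hard-coded primary keys, sequence resets, or on the database being reset before each test run.")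
--     return warnings, [], []
--
-- def check_cleaned_data(line, filename, options):
--     warnings = []
--     if 'if' in line and 'cleaned_data' in line:
--         warnings.append("Checking the existence of cleaned_data to determine validity is no longer supported. Test on is_valid() instead.")
--     return warnings, [], []
--
-- def check_slugify(line, filename, options):
--     warnings = []
--     if 'django.template.defaultfilters' in line and 'slugify' in line:
--         warnings.append("slugify() is now available as a standalone function in django.utils.text.")
--     return warnings, [], []
--
-- def check_localflavor(line, filename, options):
--     warnings = []
--     if 'django.contrib' in line and 'localflavor' in line:
--         warnings.append("django.contrib.localflavor is deprecated in favor of the django-localflavor package.")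
--     return warnings, [], []
--
-- def check_depth(line, filename, options):
--     warnings = []
--     if 'select_related' in line and 'depth' in line:
--         warnings.append("The 'depth' parameter to select_related is deprecated. Use field names instead.")
--     return warnings, [], []
--
-- def check_django_15(line, filename, options):
--     warnings = []
--     info = []
--     errors = []
--
--     for check in (check_password_hasher, check_simplejson,
--                   check_transactiontestcase, check_cleaned_data,
--                   check_slugify, check_localflavor,
--                   check_depth):
--         warn, err, inf = check(line, filename, options)
--         warnings += warn
--         info += inf
--         errors += err
--
--     return warnings, errors, info
-- ===== SOURCE B (Python) =====
-- # Different algorithm: a single multi-pattern scan over the line's positions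
-- # collects the set of tokens that occur anywhere; warnings are then read off
-- # that found-set with the rule table. Replaces seven independent substring
-- # searches with one left-to-right sweep.
-- _TOKENS = ('PASSWORD_HASHERS', 'simplejson', 'TransactionTestCase', 'if',
--            'cleaned_data', 'django.template.defaultfilters', 'slugify',
--            'django.contrib', 'localflavor', 'select_related', 'depth')
--
-- _RULES = [
--     (['PASSWORD_HASHERS'],
--      'Custom password hashers are now required to accept Unicode strings.'),
--     (['simplejson'],
--      "Use of the standard-library 'json' module is strongly recommended instead of simplejson."),
--     (['TransactionTestCase'],
--      "TransactionTestCase behavior has changed; check that tests do not rely on hard-coded primary keys, sequence resets, or on the database being reset before each test run."),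
--     (['if', 'cleaned_data'],
--      "Checking the existence of cleaned_data to determine validity is no longer supported. Test on is_valid() instead."),
--     (['django.template.defaultfilters', 'slugify'],
--      "slugify() is now available as a standalone function in django.utils.text."),
--     (['django.contrib', 'localflavor'],
--      "django.contrib.localflavor is deprecated in favor of the django-localflavor package."),
--     (['select_related', 'depth'],
--      "The 'depth' parameter to select_related is deprecated. Use field names instead."),
-- ]
--
-- def check_django_15(line, filename, options):
--     found = set()
--     for i in range(len(line)):
--         for t in _TOKENS:
--             if line.startswith(t, i):
--                 found.add(t)
--     warnings = [msg for need, msg in _RULES if all(t in found for t in need)]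
--     return warnings, [], []
-- ===== Notes on version B (the rewrite author's own statement) =====
-- stated objective: alternative
-- what changed: Replaces seven independent substring-membership checks with a single left-to-right multi-pattern scan over the line that builds a found-token set in one sweep, from which the warning messages are then read off via a rule table.
import Mathlib
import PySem

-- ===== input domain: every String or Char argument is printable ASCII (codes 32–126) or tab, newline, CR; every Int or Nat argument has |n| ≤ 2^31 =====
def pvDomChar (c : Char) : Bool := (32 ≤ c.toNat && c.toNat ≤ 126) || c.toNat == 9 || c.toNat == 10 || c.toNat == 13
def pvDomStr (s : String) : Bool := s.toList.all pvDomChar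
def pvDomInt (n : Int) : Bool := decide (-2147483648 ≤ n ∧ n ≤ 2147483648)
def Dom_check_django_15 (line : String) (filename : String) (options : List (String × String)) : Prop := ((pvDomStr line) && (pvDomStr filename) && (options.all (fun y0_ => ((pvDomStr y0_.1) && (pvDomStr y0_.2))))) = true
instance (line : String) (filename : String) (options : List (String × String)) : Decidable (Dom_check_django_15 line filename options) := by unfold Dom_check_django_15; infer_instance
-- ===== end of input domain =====

-- ===== PORT A =====
-- B replaces seven independent substring searches with one multi-pattern sweep over the line (alternative algorithm, same cost class).
def check_password_hasher (line : String) (_filename : String) (_options : List (String × String)) : List String × List String × List String :=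
  let warnings := if PySem.Str.isIn "PASSWORD_HASHERS" line then ["Custom password hashers are now required to accept Unicode strings."] else []
  (warnings, [], [])

def check_simplejson (line : String) (_filename : String) (_options : List (String × String)) : List String × List String × List String :=
  let warnings := if PySem.Str.isIn "simplejson" line then ["Use of the standard-library 'json' module is strongly recommended instead of simplejson."] else []
  (warnings, [], [])

def check_transactiontestcase (line : String) (_filename : String) (_options : List (String × String)) : List String × List String × List String :=
  let warnings := if PySem.Str.isIn "TransactionTestCase" line then ["TransactionTestCase behavior has changed; check that tests do not rely on hard-coded primary keys, sequence resets, or on the database being reset before each test run."] else []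
  (warnings, [], [])

def check_cleaned_data (line : String) (_filename : String) (_options : List (String × String)) : List String × List String × List String :=
  let warnings := if PySem.Str.isIn "if" line && PySem.Str.isIn "cleaned_data" line then ["Checking the existence of cleaned_data to determine validity is no longer supported. Test on is_valid() instead."] else []
  (warnings, [], [])

def check_slugify (line : String) (_filename : String) (_options : List (String × String)) : List String × List String × List String :=
  let warnings := if PySem.Str.isIn "django.template.defaultfilters" line && PySem.Str.isIn "slugify" line then ["slugify() is now available as a standalone function in django.utils.text."] else []
  (warnings, [], [])

def check_localflavor (line : String) (_filename : String) (_options : List (String × String)) : List String × List String × List String :=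
  let warnings := if PySem.Str.isIn "django.contrib" line && PySem.Str.isIn "localflavor" line then ["django.contrib.localflavor is deprecated in favor of the django-localflavor package."] else []
  (warnings, [], [])

def check_depth (line : String) (_filename : String) (_options : List (String × String)) : List String × List String × List String :=
  let warnings := if PySem.Str.isIn "select_related" line && PySem.Str.isIn "depth" line then ["The 'depth' parameter to select_related is deprecated. Use field names instead."] else []
  (warnings, [], [])

def check_django_15 (line : String) (filename : String) (options : List (String × String)) : List String × List String × List String :=
  -- for check in (...): warn, err, inf = check(line, filename, options); warnings += warn; info += inf; errors += err
  let st := [check_password_hasher, check_simplejson,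
             check_transactiontestcase, check_cleaned_data,
             check_slugify, check_localflavor,
             check_depth].foldl
    (fun (acc : List String × List String × List String) check =>
      let r := check line filename options
      (acc.1 ++ r.1, acc.2.1 ++ r.2.2, acc.2.2 ++ r.2.1))
    ([], [], [])
  (st.1, st.2.2, st.2.1)

-- ===== PORT B =====
def TOKENS_15 : List String :=
  ["PASSWORD_HASHERS", "simplejson", "TransactionTestCase", "if",
   "cleaned_data", "django.template.defaultfilters", "slugify",
   "django.contrib", "localflavor", "select_related", "depth"]

def RULES_15 : List (List String × String) :=
  [(["PASSWORD_HASHERS"], "Custom password hashers are now required to accept Unicode strings."),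
   (["simplejson"], "Use of the standard-library 'json' module is strongly recommended instead of simplejson."),
   (["TransactionTestCase"], "TransactionTestCase behavior has changed; check that tests do not rely on hard-coded primary keys, sequence resets, or on the database being reset before each test run."),
   (["if", "cleaned_data"], "Checking the existence of cleaned_data to determine validity is no longer supported. Test on is_valid() instead."),
   (["django.template.defaultfilters", "slugify"], "slugify() is now available as a standalone function in django.utils.text."),
   (["django.contrib", "localflavor"], "django.contrib.localflavor is deprecated in favor of the django-localflavor package."),
   (["select_related", "depth"], "The 'depth' parameter to select_related is deprecated. Use field names instead.")]

-- the scan loop of Source B: for i in range(len(line)): for t in _TOKENS: if line.startswith(t, i): found.add(t)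
-- line.startswith(t, i) is ported exactly as t.toList.isPrefixOf (line.toList.drop i)
def scanFound_15 (line : String) : PySem.Set String :=
  (List.range line.toList.length).foldl
    (fun (found : PySem.Set String) i =>
      TOKENS_15.foldl
        (fun (found : PySem.Set String) t =>
          if t.toList.isPrefixOf (line.toList.drop i) then PySem.Set.add found t else found)
        found)
    PySem.Set.empty

def check_django_15_alt (line : String) (_filename : String) (_options : List (String × String)) : List String × List String × List String :=
  let found := scanFound_15 line
  (RULES_15.filterMap (fun r => if r.1.all (fun t => PySem.Set.contains found t) then some r.2 else none), [], [])

-- ===== PRECONDITION & SPEC =====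
def Spec_check_django_15 (line : String) (filename : String) (options : List (String × String)) (out : List String × List String × List String) : Prop := out = check_django_15_alt line filename options
instance (line : String) (filename : String) (options : List (String × String)) (out : List String × List String × List String) : Decidable (Spec_check_django_15 line filename options out) := by unfold Spec_check_django_15; infer_instance

-- ===== CLAIM =====
def Claim_equal_check_django_15 : Prop := ∀ (line : String) (filename : String) (options : List (String × String)), Dom_check_django_15 line filename options → Spec_check_django_15 line filename options (check_django_15 line filename options)

-- ===== LEMMAS AND PROOFS =====
lemma mem_foldl_add_if {p : String → Bool} (ts : List String) (fd : PySem.Set String) (x : String) :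
    x ∈ ts.foldl (fun fd t => if p t then PySem.Set.add fd t else fd) fd ↔
      x ∈ fd ∨ (x ∈ ts ∧ p x = true) := by
  induction ts generalizing fd with
  | nil => simp
  | cons t ts ih =>
    simp only [List.foldl_cons, ih, List.mem_cons]
    by_cases h : p t
    · simp only [h, if_true, PySem.Set.mem_add]
      by_cases hx : x = t <;> simp [hx] <;> tauto
    · simp only [h, if_false]
      by_cases hx : x = t
      · subst hx; simp [h]
      · simp [hx]

lemma mem_scanFound_aux (line : String) (n : Nat) (fd : PySem.Set String) (x : String) :
    x ∈ (List.range n).foldl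
          (fun (found : PySem.Set String) i =>
            TOKENS_15.foldl
              (fun (found : PySem.Set String) t =>
                if t.toList.isPrefixOf (line.toList.drop i) then PySem.Set.add found t else found)
              found)
          fd ↔
      x ∈ fd ∨ (x ∈ TOKENS_15 ∧ ∃ i < n, x.toList.isPrefixOf (line.toList.drop i) = true) := by
  induction n generalizing fd with
  | zero => simp
  | succ n ih =>
    rw [List.range_succ, List.foldl_append]
    simp only [List.foldl_cons, List.foldl_nil]
    rw [mem_foldl_add_if, ih]
    constructor
    · rintro ((h | ⟨hm, i, hi, hp⟩) | ⟨hm, hp⟩)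
      · exact Or.inl h
      · exact Or.inr ⟨hm, i, Nat.lt_succ_of_lt hi, hp⟩
      · exact Or.inr ⟨hm, n, Nat.lt_succ_self n, hp⟩
    · rintro (h | ⟨hm, i, hi, hp⟩)
      · exact Or.inl (Or.inl h)
      · rcases Nat.lt_succ_iff_lt_or_eq.mp hi with h' | rfl
        · exact Or.inl (Or.inr ⟨hm, i, h', hp⟩)
        · exact Or.inr ⟨hm, hp⟩

lemma contains_scanFound (line : String) (t : String)
    (hm : t ∈ TOKENS_15) (hne : t.toList ≠ []) :
    PySem.Set.contains (scanFound_15 line) t = PySem.Str.isIn t line := by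
  have key : t ∈ scanFound_15 line ↔ PySem.Str.isIn t line = true := by
    rw [scanFound_15, mem_scanFound_aux]
    simp only [PySem.Set.empty, List.not_mem_nil, false_or]
    rw [PySem.Str.isIn_eq]
    rw [← PySem.Chars.exists_prefix_drop_iff_isIn]
    constructor
    · rintro ⟨_, i, _, hp⟩
      exact ⟨i, List.isPrefixOf_iff_prefix.mp hp⟩
    · rintro ⟨j, hp⟩
      refine ⟨hm, j, ?_, List.isPrefixOf_iff_prefix.mpr hp⟩
      by_contra hj
      have hj' : line.toList.length ≤ j := Nat.le_of_not_lt hj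
      have hnil : line.toList.drop j = [] := List.drop_eq_nil_of_le hj'
      rw [hnil] at hp
      exact hne (List.prefix_nil.mp hp)
  have hc : PySem.Set.contains (scanFound_15 line) t = decide (t ∈ scanFound_15 line) := by
    simp [PySem.Set.contains, List.contains_eq_mem]
  rw [hc]
  cases hb : PySem.Str.isIn t line <;> simp [key, ← PySem.Str.isIn_eq, hb]

set_option maxHeartbeats 2000000 in
set_option maxRecDepth 4000 in
lemma check_django_15_eq_alt (line : String) (filename : String) (options : List (String × String)) :
    check_django_15 line filename options = check_django_15_alt line filename options := by
  unfold check_django_15 check_django_15_alt RULES_15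
    check_password_hasher check_simplejson check_transactiontestcase check_cleaned_data
    check_slugify check_localflavor check_depth
  simp only [List.foldl, List.filterMap, List.all, Bool.and_true]
  rw [contains_scanFound line "PASSWORD_HASHERS" (by decide) (by decide),
      contains_scanFound line "simplejson" (by decide) (by decide),
      contains_scanFound line "TransactionTestCase" (by decide) (by decide),
      contains_scanFound line "if" (by decide) (by decide),
      contains_scanFound line "cleaned_data" (by decide) (by decide),
      contains_scanFound line "django.template.defaultfilters" (by decide) (by decide),
      contains_scanFound line "slugify" (by decide) (by decide),
      contains_scanFound line "django.contrib" (by decide) (by decide),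
      contains_scanFound line "localflavor" (by decide) (by decide),
      contains_scanFound line "select_related" (by decide) (by decide),
      contains_scanFound line "depth" (by decide) (by decide)]
  generalize PySem.Str.isIn "PASSWORD_HASHERS" line = c1
  generalize PySem.Str.isIn "simplejson" line = c2
  generalize PySem.Str.isIn "TransactionTestCase" line = c3
  generalize PySem.Str.isIn "if" line = c4a
  generalize PySem.Str.isIn "cleaned_data" line = c4b
  generalize PySem.Str.isIn "django.template.defaultfilters" line = c5a
  generalize PySem.Str.isIn "slugify" line = c5b
  generalize PySem.Str.isIn "django.contrib" line = c6a
  generalize PySem.Str.isIn "localflavor" line = c6b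
  generalize PySem.Str.isIn "select_related" line = c7a
  generalize PySem.Str.isIn "depth" line = c7b
  revert c1 c2 c3 c4a c4b c5a c5b c6a c6b c7a c7b
  decide

-- ===== VERDICT =====
theorem check_django_15_spec : Claim_equal_check_django_15 := by
  intro line filename options _
  exact check_django_15_eq_alt line filename options
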